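-- pv_equiv track=rewrite | github.com/Deven-14/leetcode | amazon internship 2025 solution.py | getTotalOfferPeriods
-- ===== SOURCE A (Python) =====
-- def getTotalOfferPeriods(sales):
--     count = 0
--     for i in range(len(sales)-2):
--         for j in range(i+2, len(sales)):
--             min_val = min(sales[i], sales[j])
--             max_val = max(sales[i+1:j])
--             if min_val > max_val:
--                 count += 1
--
--     return count
-- ===== SOURCE B (Python) =====
-- def getTotalOfferPeriods(sales):
--     n = len(sales)
--     count = 0
--     for i in range(n - 2):
--         si = sales[i]
--         m = sales[i + 1]          # running max of the interior sales[i+1:j]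
--         for j in range(i + 2, n):
--             sj = sales[j]
--             if min(si, sj) > m:
--                 count += 1
--             if sj > m:
--                 m = sj
--     return count
-- ===== Notes on version B (the rewrite author's own statement) =====
-- stated objective: faster
-- what changed: B maintains a running maximum of the interior slice as j grows instead of recomputing max(sales[i+1:j]) for every pair, removing the inner slice/max scan.
import Mathlib
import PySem

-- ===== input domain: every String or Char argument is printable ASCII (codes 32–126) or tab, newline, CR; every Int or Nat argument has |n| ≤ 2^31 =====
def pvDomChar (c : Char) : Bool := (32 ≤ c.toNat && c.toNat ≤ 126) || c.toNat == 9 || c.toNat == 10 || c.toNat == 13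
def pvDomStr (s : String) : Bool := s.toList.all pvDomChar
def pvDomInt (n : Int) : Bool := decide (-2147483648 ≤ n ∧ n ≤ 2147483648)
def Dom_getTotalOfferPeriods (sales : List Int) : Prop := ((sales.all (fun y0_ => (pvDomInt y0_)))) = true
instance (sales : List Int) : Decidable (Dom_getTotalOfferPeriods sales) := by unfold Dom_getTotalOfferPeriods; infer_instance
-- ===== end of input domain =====

-- B replaces A's per-pair slice-max recomputation by a running interior maximum: O(n^2) instead of O(n^3).

-- ===== PORT A =====
-- inner-loop body of A: min(sales[i], sales[j]) vs max(sales[i+1:j])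
-- (the slice is nonempty whenever the loops reach it, so the .getD 0 default of max? is never used)
def pvStepA (sales : List Int) (i count j : Int) : Int :=
  let min_val := min (PySem.List.pyGetD sales i 0) (PySem.List.pyGetD sales j 0)
  let max_val := (PySem.List.max? (PySem.List.slice sales (some (i + 1)) (some j)) (fun y => y)).getD 0
  if min_val > max_val then count + 1 else count

def getTotalOfferPeriods (sales : List Int) : Int :=
  (PySem.List.pyRange 0 ((sales.length : Int) - 2) 1).foldl
    (fun count i =>
      (PySem.List.pyRange (i + 2) (sales.length : Int) 1).foldl (pvStepA sales i) count)
    0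

-- ===== PORT B =====
-- inner-loop body of B: state (count, m) where m is the running maximum of the interior
def pvStepB (sales : List Int) (si : Int) (p : Int × Int) (j : Int) : Int × Int :=
  let sj := PySem.List.pyGetD sales j 0
  (if min si sj > p.2 then p.1 + 1 else p.1, if sj > p.2 then sj else p.2)

def getTotalOfferPeriods_alt (sales : List Int) : Int :=
  (PySem.List.pyRange 0 ((sales.length : Int) - 2) 1).foldl
    (fun count i =>
      let si := PySem.List.pyGetD sales i 0
      let m := PySem.List.pyGetD sales (i + 1) 0
      ((PySem.List.pyRange (i + 2) (sales.length : Int) 1).foldl (pvStepB sales si) (count, m)).1)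
    0

-- ===== PRECONDITION & SPEC =====
def Spec_getTotalOfferPeriods (sales : List Int) (out : Int) : Prop := out = getTotalOfferPeriods_alt sales
instance (sales : List Int) (out : Int) : Decidable (Spec_getTotalOfferPeriods sales out) := by unfold Spec_getTotalOfferPeriods; infer_instance

-- ===== CLAIM (what is proved, stated in full; the proofs are below) =====
def Claim_equal_getTotalOfferPeriods : Prop := ∀ (sales : List Int), Dom_getTotalOfferPeriods sales → Spec_getTotalOfferPeriods sales (getTotalOfferPeriods sales)

-- ===== LEMMAS AND PROOFS =====

-- A's max_val for the pair (i, j): the maximum of the interior slice sales[i+1:j]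
def pvMval (sales : List Int) (i j : Int) : Int :=
  (PySem.List.max? (PySem.List.slice sales (some (i + 1)) (some j)) (fun y => y)).getD 0

lemma pvMaxD_append (ys : List Int) (x : Int) (h : ys ≠ []) :
    (PySem.List.max? (ys ++ [x]) (fun y => y)).getD 0
      = max ((PySem.List.max? ys (fun y => y)).getD 0) x := by
  obtain ⟨h0, t, rfl⟩ := List.exists_cons_of_ne_nil h
  rw [List.cons_append, PySem.List.max?_id_cons, PySem.List.max?_id_cons]
  simp [List.foldl_append]

-- growing the interior by one element updates the slice maximum as a running max
lemma pvMval_succ (sales : List Int) (i a : Int) (hi : 0 ≤ i) (ha : i + 2 ≤ a)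
    (hlt : a < (sales.length : Int)) :
    pvMval sales i (a + 1) = max (pvMval sales i a) (PySem.List.pyGetD sales a 0) := by
  unfold pvMval
  have h1 : (0:Int) ≤ i + 1 := by omega
  have h2 : (0:Int) ≤ a := by omega
  rw [PySem.List.slice_toNat _ h1 h2, PySem.List.slice_toNat _ h1 (by omega : (0:Int) ≤ a + 1)]
  set p := (i + 1).toNat with hp
  have hpa : p < a.toNat := by omega
  have hlen : a.toNat < sales.length := by omega
  have hq : a.toNat - p < (sales.drop p).length := by
    simp [List.length_drop]; omega
  have htake : (sales.drop p).take ((a + 1).toNat - p)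
      = (sales.drop p).take (a.toNat - p) ++ [(sales.drop p)[a.toNat - p]] := by
    have : (a + 1).toNat - p = (a.toNat - p) + 1 := by omega
    rw [this, List.take_add_one, List.getElem?_eq_getElem hq]
    simp
  rw [htake, pvMaxD_append]
  · congr 1
    have hget : (sales.drop p)[a.toNat - p] = sales[a.toNat] := by
      rw [List.getElem_drop]
      congr 1
      omega
    rw [hget, PySem.List.pyGetD_eq_getElem sales 0 h2 hlt]
  · have : 0 < a.toNat - p := by omega
    intro hnil
    have := congrArg List.length hnil
    simp [List.length_take] at this
    omega

-- the inner loops agree: A's fold from j = a equals the first component of B's fold,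
-- provided B's running max equals the slice maximum at a
lemma pvInner (sales : List Int) (i : Int) (hi : 0 ≤ i) :
    ∀ (n : Nat) (a : Int), ((sales.length : Int) - a).toNat = n → i + 2 ≤ a →
      a ≤ (sales.length : Int) → ∀ c : Int,
      (PySem.List.pyRange a (sales.length : Int) 1).foldl (pvStepA sales i) c
        = ((PySem.List.pyRange a (sales.length : Int) 1).foldl
            (pvStepB sales (PySem.List.pyGetD sales i 0)) (c, pvMval sales i a)).1 := by
  intro n
  induction n with
  | zero =>
    intro a hn ha1 ha2 c
    have : (sales.length : Int) ≤ a := by omega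
    rw [PySem.List.pyRange_one_eq_nil this]
    simp
  | succ m ih =>
    intro a hn ha1 ha2 c
    have hlt : a < (sales.length : Int) := by omega
    rw [PySem.List.pyRange_one_cons hlt]
    simp only [List.foldl_cons]
    have hstepA : pvStepA sales i c a
        = if min (PySem.List.pyGetD sales i 0) (PySem.List.pyGetD sales a 0) > pvMval sales i a
          then c + 1 else c := rfl
    have hstepB : pvStepB sales (PySem.List.pyGetD sales i 0) (c, pvMval sales i a) a
        = (if min (PySem.List.pyGetD sales i 0) (PySem.List.pyGetD sales a 0) > pvMval sales i a
            then c + 1 else c,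
           if PySem.List.pyGetD sales a 0 > pvMval sales i a
            then PySem.List.pyGetD sales a 0 else pvMval sales i a) := rfl
    rw [hstepA, hstepB]
    have hm : (if PySem.List.pyGetD sales a 0 > pvMval sales i a
        then PySem.List.pyGetD sales a 0 else pvMval sales i a) = pvMval sales i (a + 1) := by
      rw [pvMval_succ sales i a hi ha1 hlt]
      rcases le_or_gt (PySem.List.pyGetD sales a 0) (pvMval sales i a) with h | h
      · rw [if_neg (by omega), max_eq_left h]
      · rw [if_pos h, max_eq_right (le_of_lt h)]
    rw [hm]
    exact ih (a + 1) (by omega) (by omega) (by omega) _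

-- ===== VERDICT (by name: the statement is the Claim_ definition above) =====
theorem getTotalOfferPeriods_spec : Claim_equal_getTotalOfferPeriods := by
  intro sales _
  unfold Spec_getTotalOfferPeriods getTotalOfferPeriods getTotalOfferPeriods_alt
  apply PySem.List.foldl_congr_mem
  intro c i himem
  have hi := (PySem.List.mem_pyRange_one).mp himem
  have hi0 : 0 ≤ i := hi.1
  have hi2 : i + 2 ≤ (sales.length : Int) := by omega
  have hm : PySem.List.pyGetD sales (i + 1) 0 = pvMval sales i (i + 2) := by
    unfold pvMval
    rw [PySem.List.slice_toNat _ (by omega) (by omega)]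
    have h1 : (i + 2).toNat - (i + 1).toNat = 1 := by omega
    rw [h1]
    have hlen : (i + 1).toNat < sales.length := by omega
    rw [List.take_one, List.head?_drop, List.getElem?_eq_getElem hlen,
      PySem.List.pyGetD_eq_getElem sales 0 (by omega : (0:Int) ≤ i + 1) (by omega)]
    simp [PySem.List.max?_id_cons]
  simp only [hm]
  exact pvInner sales i hi0 (((sales.length : Int) - (i + 2)).toNat) (i + 2) rfl (le_refl _)
    (by omega) _
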